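-- pv_equiv track=rewrite | github.com/NarutoUchiha39/neural_question_generation | process_data.py | filter_with_maxlen
-- ===== SOURCE A (Python) =====
-- def filter_with_maxlen(maxlen_s, maxlen_q, sentence, question):
--     # Filtering with maxlen(sentence)
--     temp_sentence = []
--     temp_question = []
--
--     for i, line in enumerate(sentence):
--         if len(line) <= maxlen_s:
--             temp_sentence.append(line)
--             temp_question.append(question[i])
--
--     # Filtering with maxlen(question)
--     filtered_sentence = []
--     filtered_question = []
--
--     for i, line in enumerate(temp_question):
--         if len(line) <= maxlen_q:
--             filtered_sentence.append(temp_sentence[i])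
--             filtered_question.append(line)
--
--     return filtered_sentence, filtered_question
-- ===== SOURCE B (Python) =====
-- def filter_with_maxlen(maxlen_s, maxlen_q, sentence, question):
--     kept = [p for p in zip(sentence, question)
--             if len(p[0]) <= maxlen_s and len(p[1]) <= maxlen_q]
--     return [s for s, _ in kept], [q for _, q in kept]
-- ===== Notes on version B (the rewrite author's own statement) =====
-- stated objective: idiomatic
-- what changed: A zip-and-filter comprehension over the paired lists (then unzip) replaces A's two sequential index-based passes with intermediate temp lists.
import Mathlib
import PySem

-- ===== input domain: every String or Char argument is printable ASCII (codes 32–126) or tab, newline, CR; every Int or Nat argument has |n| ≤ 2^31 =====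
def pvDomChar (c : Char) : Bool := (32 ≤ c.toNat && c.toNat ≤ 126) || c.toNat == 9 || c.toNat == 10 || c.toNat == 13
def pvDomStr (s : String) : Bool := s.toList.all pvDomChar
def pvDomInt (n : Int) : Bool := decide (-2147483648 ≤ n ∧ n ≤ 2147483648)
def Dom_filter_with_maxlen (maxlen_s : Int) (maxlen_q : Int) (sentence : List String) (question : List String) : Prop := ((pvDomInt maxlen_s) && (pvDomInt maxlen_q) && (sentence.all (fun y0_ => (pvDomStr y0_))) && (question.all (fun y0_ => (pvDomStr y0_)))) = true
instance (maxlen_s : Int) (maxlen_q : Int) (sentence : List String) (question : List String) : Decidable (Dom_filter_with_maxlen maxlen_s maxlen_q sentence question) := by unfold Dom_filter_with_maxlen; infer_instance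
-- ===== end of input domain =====

-- B replaces A's two index-based filtering passes (with temp lists) by one
-- idiomatic zip-filter-unzip; equal return values are proved on Pre_ (exactly
-- where Python A returns; outside it A raises IndexError on question[i]).

-- ===== PORT A =====
-- first loop of A: over enumerate(sentence), keeping (temp_sentence, temp_question)
def fwmA_loop1 (maxlen_s : Int) (question : List String) :
    List String → Nat → List String × List String
  | [], _ => ([], [])
  | line :: rest, i =>
    let r := fwmA_loop1 maxlen_s question rest (i + 1)
    if (PySem.Str.len line : Int) ≤ maxlen_s then
      (line :: r.1, ((PySem.List.pyGet? question (i : Int)).getD "") :: r.2)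
    else r

-- second loop of A: over enumerate(temp_question), indexing temp_sentence[i]
def fwmA_loop2 (maxlen_q : Int) (ts : List String) :
    List String → Nat → List String × List String
  | [], _ => ([], [])
  | line :: rest, i =>
    let r := fwmA_loop2 maxlen_q ts rest (i + 1)
    if (PySem.Str.len line : Int) ≤ maxlen_q then
      (((PySem.List.pyGet? ts (i : Int)).getD "") :: r.1, line :: r.2)
    else r

def filter_with_maxlen (maxlen_s : Int) (maxlen_q : Int) (sentence : List String) (question : List String) : List String × List String :=
  let t := fwmA_loop1 maxlen_s question sentence 0
  fwmA_loop2 maxlen_q t.1 t.2 0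

-- ===== PORT B =====
-- kept = the zipped pairs passing both length bounds; result = the unzipped kept list
def filter_with_maxlen_alt (maxlen_s : Int) (maxlen_q : Int) (sentence : List String) (question : List String) : List String × List String :=
  let kept := (sentence.zip question).filter
    (fun p => decide ((PySem.Str.len p.1 : Int) ≤ maxlen_s) &&
              decide ((PySem.Str.len p.2 : Int) ≤ maxlen_q))
  (kept.map Prod.fst, kept.map Prod.snd)

-- ===== PRECONDITION & SPEC =====
-- Pre_ excludes exactly the inputs where Python A raises IndexError: an index i whose
-- sentence passes the length filter but has no matching question[i].
def Pre_filter_with_maxlen (maxlen_s : Int) (maxlen_q : Int) (sentence : List String) (question : List String) : Prop :=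
  ∀ i : Nat, i < sentence.length →
    (PySem.Str.len (sentence.getD i "") : Int) ≤ maxlen_s → i < question.length
instance (maxlen_s : Int) (maxlen_q : Int) (sentence : List String) (question : List String) : Decidable (Pre_filter_with_maxlen maxlen_s maxlen_q sentence question) := by unfold Pre_filter_with_maxlen; infer_instance
def pvWitness_filter_with_maxlen : Int × Int × List String × List String :=
  (3, 2, ["ab", "abcd", "a"], ["xy", "x", "xyz"])

def Spec_filter_with_maxlen (maxlen_s : Int) (maxlen_q : Int) (sentence : List String) (question : List String) (out : List String × List String) : Prop := out = filter_with_maxlen_alt maxlen_s maxlen_q sentence question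
instance (maxlen_s : Int) (maxlen_q : Int) (sentence : List String) (question : List String) (out : List String × List String) : Decidable (Spec_filter_with_maxlen maxlen_s maxlen_q sentence question out) := by unfold Spec_filter_with_maxlen; infer_instance

-- ===== CLAIM (what is proved, stated in full; the proofs are below) =====
def Claim_equal_filter_with_maxlen : Prop := ∀ (maxlen_s : Int) (maxlen_q : Int) (sentence : List String) (question : List String), Dom_filter_with_maxlen maxlen_s maxlen_q sentence question → Pre_filter_with_maxlen maxlen_s maxlen_q sentence question → Spec_filter_with_maxlen maxlen_s maxlen_q sentence question (filter_with_maxlen maxlen_s maxlen_q sentence question)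


-- ===== LEMMAS AND PROOFS =====

-- the kept (sentence, question[i]) pairs of A's first pass, as one list
def fwmPairs (maxlen_s : Int) (question : List String) :
    List String → Nat → List (String × String)
  | [], _ => []
  | line :: rest, i =>
    let r := fwmPairs maxlen_s question rest (i + 1)
    if (PySem.Str.len line : Int) ≤ maxlen_s then
      (line, (PySem.List.pyGet? question (i : Int)).getD "") :: r
    else r

theorem fwmA_loop1_eq (maxlen_s : Int) (question : List String)
    (s : List String) (i : Nat) :
    fwmA_loop1 maxlen_s question s i =
      ((fwmPairs maxlen_s question s i).map Prod.fst,
       (fwmPairs maxlen_s question s i).map Prod.snd) := by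
  induction s generalizing i with
  | nil => rfl
  | cons line rest ih =>
    simp only [fwmA_loop1, fwmPairs, ih]
    split <;> rfl

theorem fwmA_loop2_eq (maxlen_q : Int) (ps : List (String × String))
    (pref : List String) :
    fwmA_loop2 maxlen_q (pref ++ ps.map Prod.fst) (ps.map Prod.snd) pref.length =
      (((ps.filter (fun p => (PySem.Str.len p.2 : Int) ≤ maxlen_q)).map Prod.fst),
       ((ps.filter (fun p => (PySem.Str.len p.2 : Int) ≤ maxlen_q)).map Prod.snd)) := by
  induction ps generalizing pref with
  | nil => rfl
  | cons p t ih =>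
    have hget : (PySem.List.pyGet? (pref ++ p.1 :: t.map Prod.fst)
        ((pref.length : Nat) : Int)).getD "" = p.1 := by
      rw [PySem.List.pyGet?_natCast]
      simp
    have hrec := ih (pref ++ [p.1])
    simp only [List.length_append, List.length_cons, List.length_nil,
      List.append_assoc, List.cons_append, List.nil_append] at hrec
    simp only [List.map_cons, fwmA_loop2, List.filter_cons]
    rw [hrec, hget]
    split_ifs with h <;> simp_all <;> omega

-- under the no-IndexError condition, A's kept pairs filtered by the question bound
-- are exactly B's filter of the zipped lists
theorem fwmPairs_filter_eq_zip (maxlen_s maxlen_q : Int) (question : List String)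
    (s : List String) (i : Nat)
    (h : ∀ k : Nat, k < s.length →
      (PySem.Str.len (s.getD k "") : Int) ≤ maxlen_s → i + k < question.length) :
    (fwmPairs maxlen_s question s i).filter
        (fun p => (PySem.Str.len p.2 : Int) ≤ maxlen_q) =
      (s.zip (question.drop i)).filter
        (fun p => decide ((PySem.Str.len p.1 : Int) ≤ maxlen_s) &&
                  decide ((PySem.Str.len p.2 : Int) ≤ maxlen_q)) := by
  induction s generalizing i with
  | nil => rfl
  | cons line rest ih =>
    have ih' := ih (i + 1) (by
      intro k hk hle
      have := h (k + 1) (by simpa using Nat.succ_lt_succ hk) (by simpa using hle)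
      omega)
    simp only [fwmPairs]
    by_cases hpass : (PySem.Str.len line : Int) ≤ maxlen_s
    · have hi : i < question.length := by
        have := h 0 (by simp) (by simpa using hpass)
        omega
      have hdrop : question.drop i = question[i] :: question.drop (i + 1) :=
        List.drop_eq_getElem_cons hi
      have hget : (PySem.List.pyGet? question ((i : Nat) : Int)).getD "" = question[i] := by
        rw [PySem.List.pyGet?_natCast]
        simp [List.getElem?_eq_getElem hi]
      rw [if_pos hpass, hdrop, hget]
      simp only [List.zip_cons_cons, List.filter_cons]
      simp only [PySem.Str.len_eq, String.length_toList] at hpass ih'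
      simp [hpass, ih']
    · rw [if_neg hpass]
      by_cases hi : i < question.length
      · have hdrop : question.drop i = question[i] :: question.drop (i + 1) :=
          List.drop_eq_getElem_cons hi
        rw [hdrop]
        simp only [List.zip_cons_cons, List.filter_cons]
        simp only [PySem.Str.len_eq, String.length_toList] at hpass ih'
        simp [hpass, ih']
      · have hdrop : question.drop i = [] := by
          apply List.drop_eq_nil_of_le; omega
        have hdrop' : question.drop (i + 1) = [] := by
          apply List.drop_eq_nil_of_le; omega
        rw [hdrop]
        rw [hdrop'] at ih'
        simpa using ih'

-- ===== VERDICT (by name: the statement is the Claim_ definition above) =====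
theorem filter_with_maxlen_spec : Claim_equal_filter_with_maxlen := by
  intro maxlen_s maxlen_q sentence question _ hpre
  unfold Spec_filter_with_maxlen filter_with_maxlen filter_with_maxlen_alt
  rw [fwmA_loop1_eq]
  have h2 := fwmA_loop2_eq maxlen_q (fwmPairs maxlen_s question sentence 0) []
  simp only [List.nil_append, List.length_nil] at h2
  rw [h2]
  have h3 := fwmPairs_filter_eq_zip maxlen_s maxlen_q question sentence 0
    (by intro k hk hle; simpa using hpre k hk hle)
  simp only [List.drop_zero] at h3
  rw [h3]
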